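-- pv_equiv track=rewrite | github.com/mchalek/euler | attempted/p132/p132.py | off_per
-- ===== SOURCE A (Python) =====
-- def A(n):
--     k = 1
--     r = 1
--     while r < n:
--         r *= 10
--         r += 1
--         k += 1
--
--     z = r % n
--
--     while z != 0:
--         k += 1
--         z *= 10
--         z += 1
--         z %= n
--
--     return k
--
-- def off_per(n):
--     offset = A(n)
--
--     k = 1
--     z = 1
--
--     while z != 0:
--         k += 1
--         z *= 10
--         z += 1
--         z %= n
--
--     return (offset, k)
-- ===== SOURCE B (Python) =====
-- def off_per(n):
--     # n | repunit R_k  iff  10^k == 1 (mod 9*|n|): iterate powers of 10 modulo 9*|n|.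
--     m = 9 * abs(n)
--     k = 1
--     p = 10 % m
--     while p != 1:
--         k += 1
--         p = p * 10 % m
--     return (k, k)
-- ===== Notes on version B (the rewrite author's own statement) =====
-- stated objective: alternative
-- what changed: A builds the actual repunit until it exceeds n and then runs two separate residue loops (z -> (10z+1) % n) to find the same index twice; B runs one loop over powers of 10 modulo 9*|n| (n | repunit R_k iff 10^k = 1 mod 9|n|) and returns its count twice, so the big-number warm-up and the duplicated second loop disappear.
-- intended difference: On n = 1 and n = -1 A returns (1, 2) because its second loop starts from the unreduced residue 1 and can never report k = 1, while B returns the smallest k twice, (1, 1), the intended value for 'the smallest such k, returned twice'. — e.g. on off_per(1): A returns [1, 2], B returns [1, 1]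
import Mathlib
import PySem

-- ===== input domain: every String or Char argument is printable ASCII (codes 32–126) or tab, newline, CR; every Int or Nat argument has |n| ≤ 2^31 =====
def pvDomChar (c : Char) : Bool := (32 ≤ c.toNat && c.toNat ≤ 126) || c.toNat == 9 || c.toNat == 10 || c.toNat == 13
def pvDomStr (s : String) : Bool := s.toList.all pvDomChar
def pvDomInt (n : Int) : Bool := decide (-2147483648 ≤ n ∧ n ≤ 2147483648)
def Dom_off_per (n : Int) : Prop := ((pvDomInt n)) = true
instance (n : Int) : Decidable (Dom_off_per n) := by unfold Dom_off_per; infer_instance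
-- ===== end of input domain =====

-- B replaces A's repunit-residue construction (two separate while-loops plus a big-number
-- warm-up loop) by a single loop over powers of 10 modulo 9*|n|, returning its count twice.

-- fuel bound for the while-loops (proved sufficient under Pre_ below)
def pvFuel (n : Int) : Nat := 10 * n.natAbs * n.natAbs + 100

-- ===== PORT A =====
-- `while r < n: r = r*10+1; k += 1` of helper A
def offLoop1 (n : Int) : Nat → Int → Int → Int × Int
  | 0, k, r => (k, r)
  | f+1, k, r => if r < n then offLoop1 n f (k+1) (r*10+1) else (k, r)

-- `while z != 0: k += 1; z = (z*10+1) % n`  (the loop A's code contains twice)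
def offLoop2 (n : Int) : Nat → Int → Int → Int
  | 0, k, _ => k
  | f+1, k, z => if z = 0 then k else offLoop2 n f (k+1) (PySem.Int.mod (z*10+1) n)

-- helper A(n)
def pvA (n : Int) : Int :=
  let p := offLoop1 n n.natAbs 1 1
  offLoop2 n (pvFuel n) p.1 (PySem.Int.mod p.2 n)

def off_per (n : Int) : List Int :=
  [pvA n, offLoop2 n (pvFuel n) 1 1]

-- ===== PORT B =====
-- `while p != 1: k += 1; p = p * 10 % m`
def altLoop (m : Int) : Nat → Int → Int → Int
  | 0, k, _ => k
  | f+1, k, p => if p = 1 then k else altLoop m f (k+1) (PySem.Int.mod (p*10) m)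

def off_per_alt (n : Int) : List Int :=
  let m := 9 * |n|
  let k := altLoop m (pvFuel n) 1 (PySem.Int.mod 10 m)
  [k, k]

-- ===== PRECONDITION & SPEC =====
-- Pre_ excludes n = 0 (both programs raise ZeroDivisionError) and n with gcd(n,10) ≠ 1
-- (no repunit is divisible by such n, so both programs loop forever and never return).
def Pre_off_per (n : Int) : Prop := n ≠ 0 ∧ Int.gcd n 10 = 1
instance (n : Int) : Decidable (Pre_off_per n) := by unfold Pre_off_per; infer_instance
def pvWitness_off_per : Int := 3

-- On n = 1 and n = -1 (every repunit is divisible) A returns (1, 2) — its second loop starts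
-- from the unreduced residue 1 and so never reports k = 1 — while B returns the smallest k
-- twice, (1, 1), which is the intended value for 'the smallest k, returned twice'.
def D_off_per (n : Int) : Prop := n = 1 ∨ n = -1
instance (n : Int) : Decidable (D_off_per n) := by unfold D_off_per; infer_instance

def Spec_off_per (n : Int) (out : List Int) : Prop := ¬ D_off_per n → out = off_per_alt n
instance (n : Int) (out : List Int) : Decidable (Spec_off_per n out) := by unfold Spec_off_per; infer_instance

def pvDiffWitness_off_per : Int := 1
def pvDiffWitnessOut_off_per : (List Int) × (List Int) := ([1, 2], [1, 1])

-- ===== CLAIM (what is proved, stated in full; the proofs are below) =====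
def Claim_unchanged_off_per : Prop := ∀ (n : Int), Dom_off_per n → Pre_off_per n → Spec_off_per n (off_per n)
def Claim_changed_off_per : Prop := Dom_off_per (pvDiffWitness_off_per) ∧ Pre_off_per (pvDiffWitness_off_per) ∧ D_off_per (pvDiffWitness_off_per) ∧ off_per (pvDiffWitness_off_per) = pvDiffWitnessOut_off_per.1 ∧ off_per_alt (pvDiffWitness_off_per) = pvDiffWitnessOut_off_per.2 ∧ pvDiffWitnessOut_off_per.1 ≠ pvDiffWitnessOut_off_per.2
def Claim_exact_off_per : Prop := ∀ (n : Int), Dom_off_per n → Pre_off_per n → D_off_per n → off_per n ≠ off_per_alt n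

-- ===== LEMMAS AND PROOFS =====

-- the repunit 1, 11, 111, …
def repu : Nat → Int
  | 0 => 0
  | k+1 => 10 * repu k + 1

theorem repu_ge (k : Nat) : (k : Int) ≤ repu k := by
  induction k with
  | zero => simp [repu]
  | succ k ih => simp only [repu]; push_cast; omega

theorem repu_pos {k : Nat} (h : 1 ≤ k) : 1 ≤ repu k := by
  obtain ⟨j, rfl⟩ := Nat.exists_eq_add_of_le h
  have := repu_ge j
  simp only [Nat.add_comm, repu]; omega

theorem nine_mul_repu (k : Nat) : 9 * repu k = 10 ^ k - 1 := by
  induction k with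
  | zero => simp [repu]
  | succ k ih => simp only [repu, pow_succ]; linarith

theorem pymod_modeq (a b : Int) : PySem.Int.mod a b ≡ a [ZMOD b] := by
  rw [Int.modEq_iff_dvd]
  exact ⟨PySem.Int.floordiv a b, by have := PySem.Int.floordiv_mul_add_mod a b; linarith⟩

theorem eq_of_modeq_of_bounds {m a b : Int} (h : a ≡ b [ZMOD m])
    (ha0 : 0 ≤ a) (ha : a < m) (hb0 : 0 ≤ b) (hb : b < m) : a = b := by
  have h1 : a % m = a := Int.emod_eq_of_lt ha0 ha
  have h2 : b % m = b := Int.emod_eq_of_lt hb0 hb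
  unfold Int.ModEq at h
  omega

-- characterization of A's z-loop: from index a with z ≡ repu a, it returns a + t for the
-- minimal t with n ∣ repu (a+t)
theorem offLoop2_eq (n : Int) :
    ∀ (t fuel a : Nat) (z : Int), t ≤ fuel → 1 ≤ a →
    z ≡ repu a [ZMOD n] → (z = 0 ↔ n ∣ repu a) →
    (n ∣ repu (a + t)) → (∀ s < t, ¬ n ∣ repu (a + s)) →
    offLoop2 n fuel (a : Int) z = ((a + t : Nat) : Int) := by
  intro t
  induction t with
  | zero =>
    intro fuel a z _ _ _ hiff hhit _
    have hz : z = 0 := hiff.mpr (by simpa using hhit)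
    cases fuel <;> simp [offLoop2, hz]
  | succ t ih =>
    intro fuel a z hle ha hcong hiff hhit hmin
    have hz : z ≠ 0 := fun h0 => hmin 0 (Nat.succ_pos t) (by simpa using hiff.mp h0)
    obtain ⟨f, rfl⟩ : ∃ f, fuel = f + 1 := ⟨fuel - 1, by omega⟩
    simp only [offLoop2, hz, if_false]
    have hstep : (z * 10 + 1) ≡ repu (a + 1) [ZMOD n] := by
      have : repu (a + 1) = 10 * repu a + 1 := rfl
      rw [this]
      calc z * 10 + 1 ≡ repu a * 10 + 1 [ZMOD n] := Int.ModEq.add_right 1 (Int.ModEq.mul_right 10 hcong)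
        _ = 10 * repu a + 1 := by ring
    have hcast : (a : Int) + 1 = ((a + 1 : Nat) : Int) := by push_cast; ring
    rw [hcast]
    have := ih f (a + 1) (PySem.Int.mod (z*10+1) n) (by omega) (by omega)
      ((pymod_modeq _ _).trans hstep)
      (by rw [PySem.Int.mod_eq_zero_iff_dvd]
          exact dvd_iff_dvd_of_dvd_sub (Int.modEq_iff_dvd.mp hstep) |>.symm)
      (by have : a + 1 + t = a + (t + 1) := by omega
          rw [this]; exact hhit)
      (fun s hs => by
          have : a + 1 + s = a + (s + 1) := by omega
          rw [this]; exact hmin (s+1) (by omega))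
    rw [this]; congr 1; omega

-- characterization of B's power loop
theorem altLoop_eq (m : Int) (hm : 2 ≤ m) :
    ∀ (t fuel a : Nat) (p : Int), t ≤ fuel →
    p ≡ 10 ^ a [ZMOD m] → 0 ≤ p → p < m →
    (m ∣ 10 ^ (a + t) - 1) → (∀ s < t, ¬ m ∣ 10 ^ (a + s) - 1) →
    altLoop m fuel (a : Int) p = ((a + t : Nat) : Int) := by
  intro t
  induction t with
  | zero =>
    intro fuel a p _ hcong hp0 hpm hhit _
    have hp : p = 1 := by
      refine eq_of_modeq_of_bounds (hcong.trans ?_) hp0 hpm (by omega) (by omega)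
      rw [Int.modEq_iff_dvd]
      have h := hhit
      simp only [Nat.add_zero] at h
      rw [show (1:Int) - 10 ^ a = -(10 ^ a - 1) by ring, dvd_neg]
      exact h
    cases fuel <;> simp [altLoop, hp]
  | succ t ih =>
    intro fuel a p hle hcong hp0 hpm hhit hmin
    have hp : p ≠ 1 := by
      intro h1
      refine hmin 0 (Nat.succ_pos t) ?_
      simp only [Nat.add_zero]
      have : (10:Int) ^ a ≡ 1 [ZMOD m] := (h1 ▸ hcong).symm
      simpa using Int.modEq_iff_dvd.mp this.symm
    obtain ⟨f, rfl⟩ : ∃ f, fuel = f + 1 := ⟨fuel - 1, by omega⟩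
    simp only [altLoop, hp, if_false]
    have hstep : (p * 10) ≡ 10 ^ (a + 1) [ZMOD m] := by
      calc p * 10 ≡ 10 ^ a * 10 [ZMOD m] := Int.ModEq.mul_right 10 hcong
        _ = 10 ^ (a + 1) := by rw [pow_succ]
    have hcast : (a : Int) + 1 = ((a + 1 : Nat) : Int) := by push_cast; ring
    rw [hcast]
    have := ih f (a + 1) (PySem.Int.mod (p*10) m) (by omega)
      ((pymod_modeq _ _).trans hstep)
      (PySem.Int.mod_nonneg _ (by omega)) (PySem.Int.mod_lt _ (by omega))
      (by have : a + 1 + t = a + (t + 1) := by omega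
          rw [this]; exact hhit)
      (fun s hs => by
          have : a + 1 + s = a + (s + 1) := by omega
          rw [this]; exact hmin (s+1) (by omega))
    rw [this]; congr 1; omega

-- characterization of A's warm-up loop
theorem offLoop1_spec (n : Int) :
    ∀ (f a : Nat), 1 ≤ a → (∀ j, 1 ≤ j → j < a → repu j < n) → n ≤ repu (a + f) →
    ∃ b : Nat, offLoop1 n f (a : Int) (repu a) = ((b : Int), repu b) ∧
      1 ≤ b ∧ b ≤ a + f ∧ n ≤ repu b ∧ (∀ j, 1 ≤ j → j < b → repu j < n) := by
  intro f
  induction f with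
  | zero =>
    intro a ha hmin hend
    exact ⟨a, by simp [offLoop1], ha, by omega, by simpa using hend, hmin⟩
  | succ f ih =>
    intro a ha hmin hend
    by_cases hr : repu a < n
    · have hnext : repu a * 10 + 1 = repu (a + 1) := by simp only [repu]; ring
      have hcast : (a : Int) + 1 = ((a + 1 : Nat) : Int) := by push_cast; ring
      obtain ⟨b, hb, h1, h2, h3, h4⟩ := ih (a + 1) (by omega)
        (fun j hj1 hj2 => by
          rcases Nat.lt_succ_iff_lt_or_eq.mp hj2 with h | h
          · exact hmin j hj1 h
          · subst h; exact hr)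
        (by have hEq : a + (f + 1) = a + 1 + f := by omega
            rw [hEq] at hend; exact hend)
      exact ⟨b, by simp only [offLoop1, hr, if_true]; rw [hnext, hcast]; exact hb,
        h1, by omega, h3, h4⟩
    · exact ⟨a, by simp [offLoop1, hr], ha, by omega, by omega, hmin⟩

-- existence of a hit: for coprime n, some repunit beyond any start is divisible by n
theorem exists_hit (n : Int) (hn : n ≠ 0) (hg : Int.gcd n 10 = 1) (a : Nat) :
    ∃ t, t ≤ a * (9 * n.natAbs) ∧ n ∣ repu (a + t) := by
  set M : Nat := 9 * n.natAbs with hM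
  have hM0 : 0 < M := by have : n.natAbs ≠ 0 := Int.natAbs_ne_zero.mpr hn; omega
  have hcop : Nat.Coprime 10 M := by
    have h1 : Nat.Coprime 10 n.natAbs := by
      have : Nat.gcd n.natAbs 10 = 1 := hg
      simpa [Nat.Coprime, Nat.gcd_comm] using this
    exact Nat.Coprime.mul_right (by decide) h1
  have heuler : 10 ^ M.totient ≡ 1 [MOD M] := Nat.ModEq.pow_totient hcop
  have hphi1 : 1 ≤ M.totient := Nat.totient_pos.mpr hM0
  have hphiM : M.totient ≤ M := Nat.totient_le M
  have hK : a ≤ a * M.totient := Nat.le_mul_of_pos_right a hphi1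
  have hbound : a * M.totient ≤ a * M := Nat.mul_le_mul_left a hphiM
  refine ⟨a * M.totient - a, le_trans (Nat.sub_le _ _) hbound, ?_⟩
  have hKpow : (10:Nat) ^ (a * M.totient) ≡ 1 [MOD M] := by
    have : (10:Nat) ^ (a * M.totient) = (10 ^ M.totient) ^ a := by
      rw [← pow_mul, Nat.mul_comm]
    rw [this]
    calc (10 ^ M.totient) ^ a ≡ 1 ^ a [MOD M] := Nat.ModEq.pow a heuler
      _ = 1 := one_pow a
  have hdvdN : M ∣ 10 ^ (a * M.totient) - 1 :=
    (Nat.modEq_iff_dvd' (Nat.one_le_pow _ _ (by omega))).mp hKpow.symm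
  have hdvdZ : (M : Int) ∣ (10:Int) ^ (a * M.totient) - 1 := by
    obtain ⟨c, hc⟩ := hdvdN
    have h1 : 1 ≤ (10:Nat) ^ (a * M.totient) := Nat.one_le_pow _ _ (by omega)
    refine ⟨(c : Int), ?_⟩
    zify [h1] at hc
    exact_mod_cast hc
  have hidx : a + (a * M.totient - a) = a * M.totient := by omega
  rw [hidx]
  -- n ∣ repu K  ↔  9|n| ∣ 10^K - 1
  have h9 : (9:Int) * n ∣ 9 * repu (a * M.totient) := by
    rw [nine_mul_repu]
    have habs : |(9:Int) * n| = (M : Int) := by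
      rw [abs_mul, Int.abs_eq_natAbs n]
      push_cast [hM]
      norm_num
    rw [← abs_dvd, habs]
    exact hdvdZ
  exact (mul_dvd_mul_iff_left (by norm_num : (9:Int) ≠ 0)).mp h9

theorem dvd_repu_iff (n : Int) (K : Nat) :
    n ∣ repu K ↔ (9 * |n|) ∣ (10:Int) ^ K - 1 := by
  rw [← nine_mul_repu]
  constructor
  · intro h
    rw [← abs_dvd, abs_mul]
    simpa [abs_dvd] using mul_dvd_mul_left (9:Int) (by rwa [abs_dvd] : |n| ∣ repu K)
  · intro h
    have : (9:Int) * n ∣ 9 * repu K := by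
      rw [← abs_dvd, abs_mul]
      simpa using h
    exact (mul_dvd_mul_iff_left (by norm_num : (9:Int) ≠ 0)).mp this

-- main equality on Pre_ outside D_
theorem repu_one : repu 1 = 1 := rfl

theorem main_eq (n : Int) (hn : n ≠ 0) (hg : Int.gcd n 10 = 1) (hD : ¬ D_off_per n) :
    off_per n = off_per_alt n := by
  have hA2 : 2 ≤ n.natAbs := by
    unfold D_off_per at hD
    omega
  have habs : |n| = (n.natAbs : Int) := Int.abs_eq_natAbs n
  have hm2 : (2:Int) ≤ 9 * |n| := by rw [habs]; push_cast; omega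
  have hDP : ∀ K, (n ∣ repu K) ↔ (9 * |n|) ∣ (10:Int) ^ K - 1 := dvd_repu_iff n
  -- warm-up loop
  obtain ⟨k0, hb, hk01, hk0le, hk0ge, hk0min⟩ :=
    offLoop1_spec n n.natAbs 1 (by omega)
      (fun j h1 h2 => absurd h2 (by omega))
      (by have h1 := repu_ge (1 + n.natAbs)
          push_cast at h1
          omega)
  -- minimal hits from the two start indices
  obtain ⟨t0w, ht0wb, ht0w⟩ := exists_hit n hn hg k0
  obtain ⟨t1w, ht1wb, ht1w⟩ := exists_hit n hn hg 1
  have hex0 : ∃ t, n ∣ repu (k0 + t) := ⟨t0w, ht0w⟩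
  have hex1 : ∃ t, n ∣ repu (1 + t) := ⟨t1w, ht1w⟩
  set t0 := Nat.find hex0 with ht0def
  set t1 := Nat.find hex1 with ht1def
  have ht0hit : n ∣ repu (k0 + t0) := Nat.find_spec hex0
  have ht1hit : n ∣ repu (1 + t1) := Nat.find_spec hex1
  have ht0min : ∀ s < t0, ¬ n ∣ repu (k0 + s) := fun s hs => Nat.find_min hex0 hs
  have ht1min : ∀ s < t1, ¬ n ∣ repu (1 + s) := fun s hs => Nat.find_min hex1 hs
  -- fuel bounds
  have hkey : (1 + n.natAbs) * (9 * n.natAbs) ≤ 10 * n.natAbs * n.natAbs + 100 := by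
    zify
    nlinarith [sq_nonneg ((n.natAbs : Int) - 5)]
  have hfuel0 : t0 ≤ pvFuel n := by
    calc t0 ≤ t0w := Nat.find_le ht0w
      _ ≤ k0 * (9 * n.natAbs) := ht0wb
      _ ≤ (1 + n.natAbs) * (9 * n.natAbs) := Nat.mul_le_mul_right _ (by omega)
      _ ≤ 10 * n.natAbs * n.natAbs + 100 := hkey
      _ = pvFuel n := rfl
  have hfuel1 : t1 ≤ pvFuel n := by
    calc t1 ≤ t1w := Nat.find_le ht1w
      _ ≤ 1 * (9 * n.natAbs) := ht1wb
      _ ≤ (1 + n.natAbs) * (9 * n.natAbs) := Nat.mul_le_mul_right _ (by omega)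
      _ ≤ 10 * n.natAbs * n.natAbs + 100 := hkey
      _ = pvFuel n := rfl
  -- the two minimal hit indices coincide
  have hK01 : k0 + t0 = 1 + t1 := by
    have hnohit_low : ∀ K, 1 ≤ K → K < k0 → ¬ n ∣ repu K := by
      intro K h1 h2 hdvd
      have hlt : repu K < n := hk0min K h1 h2
      have hpos : 0 < repu K := repu_pos h1
      have := Int.le_of_dvd hpos hdvd
      omega
    have hge : k0 ≤ 1 + t1 := by
      by_contra h
      exact hnohit_low (1 + t1) (by omega) (by omega) ht1hit
    have hle1 : k0 + t0 ≤ 1 + t1 := by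
      have := Nat.find_min' hex0 (m := 1 + t1 - k0)
        (by have hEq : k0 + (1 + t1 - k0) = 1 + t1 := by omega
            rw [hEq]; exact ht1hit)
      omega
    have hle2 : 1 + t1 ≤ k0 + t0 := by
      have := Nat.find_min' hex1 (m := k0 + t0 - 1)
        (by have hEq : 1 + (k0 + t0 - 1) = k0 + t0 := by omega
            rw [hEq]; exact ht0hit)
      omega
    omega
  -- evaluate the three loops
  have heval : offLoop1 n n.natAbs 1 1 = ((k0 : Int), repu k0) := by
    have h := hb
    rw [repu_one, Nat.cast_one] at h
    exact h
  have hoffset : pvA n = ((k0 + t0 : Nat) : Int) := by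
    have h1 : pvA n = offLoop2 n (pvFuel n) ((k0 : Int)) (PySem.Int.mod (repu k0) n) := by
      show offLoop2 n (pvFuel n) (offLoop1 n n.natAbs 1 1).1
        (PySem.Int.mod (offLoop1 n n.natAbs 1 1).2 n) = _
      rw [heval]
    rw [h1]
    exact offLoop2_eq n t0 (pvFuel n) k0 _ hfuel0 hk01
      (pymod_modeq _ _)
      (PySem.Int.mod_eq_zero_iff_dvd _ _)
      ht0hit ht0min
  have hperiod : offLoop2 n (pvFuel n) 1 1 = ((1 + t1 : Nat) : Int) := by
    have := offLoop2_eq n t1 (pvFuel n) 1 1 hfuel1 (by omega)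
      (by rw [repu_one])
      (by rw [repu_one]
          constructor
          · intro h; omega
          · intro h
            have hu : IsUnit n := isUnit_of_dvd_one h
            rw [Int.isUnit_iff] at hu
            exact absurd (by unfold D_off_per; tauto) hD)
      ht1hit ht1min
    rw [Nat.cast_one] at this
    exact this
  have halt : altLoop (9 * |n|) (pvFuel n) 1 (PySem.Int.mod 10 (9 * |n|))
      = ((1 + t1 : Nat) : Int) := by
    have := altLoop_eq (9 * |n|) hm2 t1 (pvFuel n) 1 _ hfuel1
      (by simpa using pymod_modeq 10 (9 * |n|))
      (PySem.Int.mod_nonneg _ (by omega)) (PySem.Int.mod_lt _ (by omega))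
      (by rw [← hDP]; exact ht1hit)
      (fun s hs => by rw [← hDP]; exact ht1min s hs)
    rw [Nat.cast_one] at this
    exact this
  show [pvA n, offLoop2 n (pvFuel n) 1 1]
      = [altLoop (9 * |n|) (pvFuel n) 1 (PySem.Int.mod 10 (9 * |n|)),
         altLoop (9 * |n|) (pvFuel n) 1 (PySem.Int.mod 10 (9 * |n|))]
  rw [hoffset, hperiod, halt, hK01]

-- ===== VERDICT (by name: the statement is the Claim_ definition above) =====
theorem off_per_spec : Claim_unchanged_off_per := by
  intro n _ hpre hD
  exact main_eq n hpre.1 hpre.2 hD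

theorem off_per_changed : Claim_changed_off_per := by
  unfold Claim_changed_off_per; decide

theorem off_per_tight : Claim_exact_off_per := by
  intro n _ _ hD
  unfold D_off_per at hD
  rcases hD with rfl | rfl <;> decide
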